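-- pv_equiv track=rewrite | github.com/pokerdio/generic | euler/euler-691.py | gen_b
-- ===== SOURCE A (Python) =====
-- def gen_b(n):
--     ret = [0] * n
--
--     x = 1
--     for i in range(1, n):
--         if (2 + 2 * i - x) ** 2 >= 5 * (x ** 2):
--             x += 1
--             ret[i] = 1
--     return ret
-- ===== SOURCE B (Python) =====
-- import math
--
-- def gen_b(n):
--     # how many ones occur among the first m entries: floor of m*(sqrt(5)-1)/2, exact via isqrt
--     def count(m):
--         return (math.isqrt(5 * m * m) - m) // 2
--     return [count(i + 1) - count(i) for i in range(n)]
-- ===== Notes on version B (the rewrite author's own statement) =====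
-- stated objective: simpler
-- what changed: Replaces A's stateful loop (running accumulator tested with a squared inequality and in-place list mutation) by a per-index closed form: each entry is the difference of consecutive exact running counts of ones computed with math.isqrt, so B is one comprehension with no mutable state.
import Mathlib
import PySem

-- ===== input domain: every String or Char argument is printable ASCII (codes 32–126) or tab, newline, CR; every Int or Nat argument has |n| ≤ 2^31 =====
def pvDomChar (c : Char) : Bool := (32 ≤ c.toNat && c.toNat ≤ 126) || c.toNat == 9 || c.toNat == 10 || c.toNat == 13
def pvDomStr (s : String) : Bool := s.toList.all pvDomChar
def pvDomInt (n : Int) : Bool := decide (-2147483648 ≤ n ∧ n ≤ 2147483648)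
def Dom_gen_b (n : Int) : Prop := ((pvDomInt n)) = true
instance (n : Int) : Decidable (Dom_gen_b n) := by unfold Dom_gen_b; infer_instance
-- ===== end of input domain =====

-- B replaces A's accumulator loop (mutable x, squared comparison, in-place assignment) by a
-- per-index closed form: each entry is a difference of consecutive exact isqrt-based running counts of ones (simpler).

-- ===== PORT A =====
-- A-side helper: the body of A's for-loop (state = (ret, x))
def stepF : List Int × Int → Int → List Int × Int := fun s i =>
  if 5 * s.2 ^ 2 ≤ (2 + 2 * i - s.2) ^ 2 then
    (PySem.List.pySetD s.1 i 1, s.2 + 1)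
  else s

def gen_b (n : Int) : List Int :=
  ((PySem.List.pyRange 1 n 1).foldl stepF (List.replicate n.toNat (0 : Int), 1)).1

-- ===== PORT B =====
-- hand port of math.isqrt (PySem has no isqrt): floor square root by the standard
-- digit-recursion isqrt n = adjust (2 * isqrt (n/4)), made structural with fuel = n;
-- exact for every Nat (isqrt_eq_sqrt below)
def isqrtF : Nat → Nat → Nat
  | 0, _ => 0
  | f + 1, n =>
      if n = 0 then 0
      else
        let r := 2 * isqrtF f (n / 4)
        if (r + 1) * (r + 1) ≤ n then r + 1 else r

def isqrt (n : Nat) : Nat := isqrtF n n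

def pvCount (m : Int) : Int :=
  PySem.Int.floordiv ((isqrt (5 * m * m).toNat : Int) - m) 2

def gen_b_alt (n : Int) : List Int :=
  (PySem.List.pyRange 0 n 1).map (fun i => pvCount (i + 1) - pvCount i)

-- ===== PRECONDITION & SPEC =====
def Spec_gen_b (n : Int) (out : List Int) : Prop := out = gen_b_alt n
instance (n : Int) (out : List Int) : Decidable (Spec_gen_b n out) := by unfold Spec_gen_b; infer_instance

-- ===== CLAIM (what is proved, stated in full; the proofs are below) =====
def Claim_equal_gen_b : Prop := ∀ (n : Int), Dom_gen_b n → Spec_gen_b n (gen_b n)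

-- ===== LEMMAS AND PROOFS =====

theorem isqrtF_eq_sqrt (f n : Nat) (h : n ≤ f) : isqrtF f n = Nat.sqrt n := by
  induction f generalizing n with
  | zero =>
      have hn : n = 0 := by omega
      subst hn; simp [isqrtF]
  | succ f ih =>
      by_cases h0 : n = 0
      · subst h0; simp [isqrtF]
      · simp only [isqrtF, if_neg h0]
        rw [ih (n / 4) (by omega)]
        set q := Nat.sqrt (n / 4) with hq
        have hq1 : q * q ≤ n / 4 := by
          have := Nat.sqrt_le (n / 4); simpa [hq] using this
        have hq2 : n / 4 < (q + 1) * (q + 1) := by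
          have := Nat.lt_succ_sqrt (n / 4); simpa [hq] using this
        have hub : n < (2 * q + 2) * (2 * q + 2) := by
          have h4 : n < 4 * ((q + 1) * (q + 1)) := by
            generalize (q + 1) * (q + 1) = X at hq2 ⊢; omega
          nlinarith
        have hlb : (2 * q) * (2 * q) ≤ n := by
          have h4 : 4 * (q * q) ≤ n := by
            generalize hqq : q * q = X at hq1 ⊢; omega
          nlinarith
        by_cases hc : (2 * q + 1) * (2 * q + 1) ≤ n
        · rw [if_pos hc]
          have hle := Nat.le_sqrt.mpr hc
          have hlt := Nat.sqrt_lt.mpr hub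
          omega
        · rw [if_neg hc]
          have hle := Nat.le_sqrt.mpr hlb
          have hlt : Nat.sqrt n < 2 * q + 1 := Nat.sqrt_lt.mpr (by omega)
          omega

theorem isqrt_eq_sqrt (n : Nat) : isqrt n = Nat.sqrt n := isqrtF_eq_sqrt n n le_rfl

-- running count of 1s among the first m entries, Nat version (proof-side mirror of pvCount)
def cnt (m : Nat) : Nat := (Nat.sqrt (5 * m * m) - m) / 2

theorem sqrt_ge (m : Nat) : m ≤ Nat.sqrt (5 * m * m) := by
  rw [Nat.le_sqrt]; nlinarith

theorem pvCount_cast (j : Nat) : pvCount (j : Int) = (cnt j : Int) := by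
  have hge := sqrt_ge j
  have h5 : ((5 * (j : Int) * j)).toNat = 5 * j * j := by
    rw [show (5 * (j : Int) * j) = ((5 * j * j : Nat) : Int) by push_cast; ring, Int.toNat_natCast]
  unfold pvCount cnt
  rw [h5, isqrt_eq_sqrt, (Int.natCast_sub hge).symm]
  exact_mod_cast PySem.Int.floordiv_natCast (Nat.sqrt (5 * j * j) - j) 2

theorem cnt_one : cnt 1 = 0 := by
  have h1 : 2 ≤ Nat.sqrt 5 := Nat.le_sqrt.mpr (by norm_num)
  have h2 : Nat.sqrt 5 < 3 := Nat.sqrt_lt.mpr (by norm_num)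
  unfold cnt; rw [show 5 * 1 * 1 = 5 from rfl]; omega

-- A's test (2m - x)^2 ≥ 5 x^2 at m = i+1 says exactly x ≤ cnt m
theorem cond_iff (m x : Nat) :
    (5 * (x : Int) ^ 2 ≤ (2 * (m : Int) - x) ^ 2) ↔ x ≤ cnt m := by
  have hge := sqrt_ge m
  have hs : 2 * x + m ≤ Nat.sqrt (5 * m * m) ↔ (2 * x + m) * (2 * x + m) ≤ 5 * (m * m) := by
    rw [Nat.le_sqrt]; constructor <;> intro h <;> nlinarith
  constructor
  · intro h
    have hInt : ((2 * x + m : Nat) : Int) * ((2 * x + m : Nat) : Int) ≤ 5 * ((m * m : Nat) : Int) := by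
      push_cast; nlinarith
    have hN : (2 * x + m) * (2 * x + m) ≤ 5 * (m * m) := by exact_mod_cast hInt
    have := hs.mpr hN
    unfold cnt; omega
  · intro h
    unfold cnt at h
    have hN : (2 * x + m) * (2 * x + m) ≤ 5 * (m * m) := hs.mp (by omega)
    have hInt : ((2 * x + m : Nat) : Int) * ((2 * x + m : Nat) : Int) ≤ 5 * ((m * m : Nat) : Int) := by
      exact_mod_cast hN
    push_cast at hInt; nlinarith

theorem sqrt_step_lb (m : Nat) :
    Nat.sqrt (5 * m * m) + 2 ≤ Nat.sqrt (5 * (m + 1) * (m + 1)) := by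
  set s := Nat.sqrt (5 * m * m) with hsdef
  have h1 : s * s ≤ 5 * m * m := by
    have := Nat.sqrt_le (5 * m * m); simpa [hsdef] using this
  rw [Nat.le_sqrt]
  nlinarith [sq_nonneg (2 * (s : Int) - 5 * m), h1]

theorem sqrt_step_ub (m : Nat) :
    Nat.sqrt (5 * (m + 1) * (m + 1)) ≤ Nat.sqrt (5 * m * m) + 3 := by
  set s := Nat.sqrt (5 * m * m) with hsdef
  have h2 : 5 * m * m < (s + 1) * (s + 1) := by
    have := Nat.lt_succ_sqrt (5 * m * m); simpa [hsdef] using this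
  have : Nat.sqrt (5 * (m + 1) * (m + 1)) < s + 4 := by
    rw [Nat.sqrt_lt]
    nlinarith [sq_nonneg (3 * ((s : Int) + 1) - 6 * m), h2]
  omega

theorem cnt_mono (m : Nat) : cnt m ≤ cnt (m + 1) := by
  have := sqrt_step_lb m
  have := sqrt_ge m
  have := sqrt_ge (m + 1)
  unfold cnt; omega

theorem cnt_step (m : Nat) : cnt (m + 1) ≤ cnt m + 1 := by
  have := sqrt_step_ub m
  have := sqrt_ge m
  have := sqrt_ge (m + 1)
  unfold cnt; omega

-- the list A has built after processing i = 1..k, in closed form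
def retA (N k : Nat) : List Int :=
  (List.range N).map (fun j => if 1 ≤ j ∧ j ≤ k then ((cnt (j + 1) : Int) - cnt j) else 0)

theorem retA_zero (N : Nat) : retA N 0 = List.replicate N (0 : Int) := by
  apply List.ext_getElem (by simp [retA])
  intro j h1 h2
  simp only [retA, List.getElem_map, List.getElem_range, List.getElem_replicate]
  rw [if_neg (by omega)]

theorem retA_set (N k : Nat) (hc : cnt (k + 2) = cnt (k + 1) + 1) :
    (retA N k).set (k + 1) 1 = retA N (k + 1) := by
  apply List.ext_getElem (by simp [retA])
  intro j h1 h2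
  simp only [retA, List.getElem_set, List.getElem_map, List.getElem_range] at *
  by_cases hj : j = k + 1
  · subst hj
    rw [if_pos rfl, if_pos (by omega)]
    have : ((cnt (k + 1 + 1) : Int)) - (cnt (k + 1) : Int) = 1 := by
      rw [show k + 1 + 1 = k + 2 from rfl, hc]; push_cast; ring
    omega
  · rw [if_neg (fun h => hj h.symm)]
    by_cases hj1 : 1 ≤ j ∧ j ≤ k
    · rw [if_pos hj1, if_pos (by omega)]
    · rw [if_neg hj1, if_neg (by omega)]

theorem retA_frozen (N k : Nat) (hc : cnt (k + 2) = cnt (k + 1)) :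
    retA N (k + 1) = retA N k := by
  apply List.ext_getElem (by simp [retA])
  intro j h1 h2
  simp only [retA, List.getElem_map, List.getElem_range]
  by_cases hj : j = k + 1
  · subst hj
    rw [if_pos (by omega), if_neg (by omega)]
    rw [show k + 1 + 1 = k + 2 from rfl, hc]; ring
  · by_cases hj1 : 1 ≤ j ∧ j ≤ k
    · rw [if_pos (by omega), if_pos hj1]
    · rw [if_neg (by omega), if_neg hj1]

theorem key (N k : Nat) (hk : k + 1 ≤ N) :
    (PySem.List.pyRange 1 ((k : Int) + 1) 1).foldl stepF (List.replicate N (0 : Int), 1)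
      = (retA N k, (cnt (k + 1) : Int) + 1) := by
  induction k with
  | zero =>
      rw [PySem.List.pyRange_one_eq_nil (by omega)]
      simp only [List.foldl_nil, Prod.mk.injEq]
      exact ⟨(retA_zero N).symm, by rw [cnt_one]; rfl⟩
  | succ k ih =>
      have hk' : k + 1 ≤ N := by omega
      rw [show ((k + 1 : Nat) : Int) + 1 = ((k : Int) + 1) + 1 by push_cast; ring,
          PySem.List.pyRange_one_succ_right (by omega), List.foldl_append, ih hk']
      simp only [List.foldl_cons, List.foldl_nil]
      have hiff : (5 * ((cnt (k + 1) : Int) + 1) ^ 2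
            ≤ (2 + 2 * ((k : Int) + 1) - ((cnt (k + 1) : Int) + 1)) ^ 2)
          ↔ cnt (k + 1) + 1 ≤ cnt (k + 2) := by
        have h := cond_iff (k + 2) (cnt (k + 1) + 1)
        have e2 : ((cnt (k + 1) : Int) + 1) = ((cnt (k + 1) + 1 : Nat) : Int) := by push_cast; ring
        have e : (2 + 2 * ((k : Int) + 1) - ((cnt (k + 1) + 1 : Nat) : Int))
            = 2 * ((k + 2 : Nat) : Int) - ((cnt (k + 1) + 1 : Nat) : Int) := by push_cast; ring
        rw [e2, e, h]
      unfold stepF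
      by_cases hc : cnt (k + 1) + 1 ≤ cnt (k + 2)
      · have hcc : cnt (k + 2) = cnt (k + 1) + 1 := le_antisymm (cnt_step (k + 1)) hc
        rw [if_pos (hiff.mpr hc)]
        simp only [Prod.mk.injEq]
        constructor
        · rw [show ((k : Int) + 1) = ((k + 1 : Nat) : Int) by push_cast; ring,
              PySem.List.pySetD_natCast]
          exact retA_set N k hcc
        · rw [show k + 1 + 1 = k + 2 from rfl, hcc]; push_cast; ring
      · have hm : cnt (k + 1) ≤ cnt (k + 2) := cnt_mono (k + 1)
        have hcc : cnt (k + 2) = cnt (k + 1) := by omega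
        rw [if_neg (fun h => hc (hiff.mp h))]
        simp only [Prod.mk.injEq]
        exact ⟨(retA_frozen N k hcc).symm, by rw [show k + 1 + 1 = k + 2 from rfl, hcc]⟩

-- ===== VERDICT (by name: the statement is the Claim_ definition above) =====
theorem gen_b_spec : Claim_equal_gen_b := by
  intro n _
  unfold Spec_gen_b gen_b gen_b_alt
  by_cases hn : n ≤ 0
  · rw [PySem.List.pyRange_one_eq_nil (by omega), PySem.List.pyRange_one_eq_nil (by omega)]
    simp [Int.toNat_of_nonpos hn]
  · have hN1 : 1 ≤ n.toNat := by omega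
    have hb : ((n.toNat - 1 : Nat) : Int) + 1 = n := by omega
    have hkey := key n.toNat (n.toNat - 1) (by omega)
    rw [hb] at hkey
    rw [hkey]
    rw [PySem.List.pyRange_one 0 n, show ((n - 0).toNat) = n.toNat by omega]
    rw [List.map_map]
    apply List.ext_getElem (by simp [retA])
    intro j h1 h2
    simp only [retA, List.getElem_map, List.getElem_range, Function.comp_apply]
    have e0 : ((0 : Int) + (j : Int)) = (j : Int) := by ring
    rw [e0, show ((j : Int) + 1) = ((j + 1 : Nat) : Int) by push_cast; ring,
        pvCount_cast, pvCount_cast]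
    simp only [List.length_map, List.length_range] at h2
    by_cases hj : 1 ≤ j
    · rw [if_pos (by omega)]
    · have hj0 : j = 0 := by omega
      subst hj0
      rw [if_neg (by omega)]
      rw [show (0 : Nat) + 1 = 1 from rfl, cnt_one]
      rfl
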